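-- pv_equiv track=rewrite | github.com/ShevArtV/jarvis | telegram_bot.py | split_html_for_telegram
-- ===== SOURCE A (Python) =====
-- TG_HARD_LIMIT = 4096       # жёсткий лимит Telegram
--
-- def split_html_for_telegram(html: str, limit: int = TG_HARD_LIMIT) -> list[str]:
--     """Бьёт HTML на куски ≤ limit, не разрывая открытые <pre>/<code>.
--     Стратегия: режем по \\n, если внутри куска остался незакрытый <pre><code> —
--     закрываем в конце куска и переоткрываем в начале следующего."""
--     if len(html) <= limit:
--         return [html]
--     # Делим по строкам.
--     lines = html.split("\n")
--     chunks: list[str] = []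
--     cur = ""
--     for line in lines:
--         candidate = (cur + "\n" + line) if cur else line
--         if len(candidate) <= limit:
--             cur = candidate
--             continue
--         if cur:
--             chunks.append(cur)
--         # Если сама строка длиннее лимита — режем грубо по символам.
--         while len(line) > limit:
--             chunks.append(line[:limit])
--             line = line[limit:]
--         cur = line
--     if cur:
--         chunks.append(cur)
--     # Балансируем <pre><code> между чанками.
--     balanced: list[str] = []
--     open_pre = False
--     for ch in chunks:
--         prefix = "<pre><code>" if open_pre else ""
--         body = prefix + ch
--         # Простой подсчёт: count open vs close <pre>.
--         opens = body.count("<pre>")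
--         closes = body.count("</pre>")
--         if opens > closes:
--             body += "</code></pre>"
--             open_pre = True
--         else:
--             open_pre = False
--         balanced.append(body)
--     return balanced
-- ===== SOURCE B (Python) =====
-- TG_HARD_LIMIT = 4096
--
--
-- def _tokenize(lines, limit):
--     """Expand each line into tagged pieces: hard-cut slices (True) that must
--     stand alone, and a soft piece (False) that may be grouped with neighbours."""
--     pieces = []
--     for line in lines:
--         while len(line) > limit:
--             pieces.append((line[:limit], True))
--             line = line[limit:]
--         pieces.append((line, False))
--     return pieces
--
--
-- def _group(pieces, limit):
--     """Greedy grouping over the piece stream; the current chunk is kept as a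
--     list of lines plus its joined length, joined once on flush."""
--     chunks = []
--     parts, n = [], 0
--     for text, hard in pieces:
--         if hard:
--             if n:
--                 chunks.append("\n".join(parts))
--             chunks.append(text)
--             parts, n = [], 0
--         elif not n:
--             parts, n = [text], len(text)
--         elif n + 1 + len(text) <= limit:
--             parts.append(text)
--             n += 1 + len(text)
--         else:
--             chunks.append("\n".join(parts))
--             parts, n = [text], len(text)
--     if n:
--         chunks.append("\n".join(parts))
--     return chunks
--
--
-- def _balance(chunks):
--     """Re-open/close <pre><code> across chunk borders."""
--     out = []
--     open_pre = False
--     for ch in chunks: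
--         body = ("<pre><code>" + ch) if open_pre else ch
--         open_pre = body.count("<pre>") > body.count("</pre>")
--         out.append(body + ("</code></pre>" if open_pre else ""))
--     return out
--
--
-- def split_html_for_telegram(html: str, limit: int = TG_HARD_LIMIT) -> list[str]:
--     if len(html) <= limit:
--         return [html]
--     return _balance(_group(_tokenize(html.split("\n"), limit), limit))
-- ===== Notes on version B (the rewrite author's own statement) =====
-- stated objective: alternative
-- what changed: A is one imperative loop that grows the current chunk by repeated string concatenation (with an inner hard-cut while and a trailing balancing loop); B is a three-stage pipeline over a different intermediate structure: it first expands the lines into a flat stream of tagged pieces (hard-cut slices vs soft lines), then groups that stream keeping the current chunk as a list of parts plus a running length (one join per flush instead of per-line concatenation), then balances the tags.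
import Mathlib
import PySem

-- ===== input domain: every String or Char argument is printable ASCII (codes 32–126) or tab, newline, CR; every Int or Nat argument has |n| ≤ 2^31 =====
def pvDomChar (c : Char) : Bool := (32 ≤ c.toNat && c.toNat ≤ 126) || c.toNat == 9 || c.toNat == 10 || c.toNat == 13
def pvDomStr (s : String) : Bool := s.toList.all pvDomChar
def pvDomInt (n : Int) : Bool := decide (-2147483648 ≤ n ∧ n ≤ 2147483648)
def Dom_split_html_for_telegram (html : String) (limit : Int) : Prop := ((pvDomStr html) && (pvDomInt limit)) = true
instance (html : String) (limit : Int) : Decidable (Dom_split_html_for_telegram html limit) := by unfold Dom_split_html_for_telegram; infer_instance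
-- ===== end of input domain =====

-- B replaces A's single accumulate-and-flush loop (+ second balancing loop) by a
-- three-stage pipeline: tokenize lines into tagged pieces, group the piece stream
-- with a parts-list and running length (one join per flush), then balance.
-- Objective: alternative decomposition, same asymptotic cost.

-- ===== PORT A =====
-- the balancing step applied to state (balanced, open_pre) and one chunk (body of A's second loop)
def pvBalStep (st : List (List Char) × Bool) (ch : List Char) : List (List Char) × Bool :=
  let pre := if st.2 then "<pre><code>".toList else []
  let body := pre ++ ch
  let opens := PySem.Chars.count body "<pre>".toList
  let closes := PySem.Chars.count body "</pre>".toList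
  if opens > closes then (st.1 ++ [body ++ "</code></pre>".toList], true)
  else (st.1 ++ [body], false)

-- the 'while len(line) > limit' loop of A; fuel = initial line length (enough when 0 < limit;
-- with limit ≤ 0 Python diverges there, so nothing is claimed about its value)
def pvHardCutA (fuel : Nat) (line : List Char) (limit : Int) (chunks : List (List Char)) :
    List (List Char) × List Char :=
  match fuel with
  | 0 => (chunks, line)
  | fuel + 1 =>
    if (line.length : Int) > limit then
      if 0 < limit then
        pvHardCutA fuel (PySem.Chars.slice line (some limit) none) limit
          (chunks ++ [PySem.Chars.slice line none (some limit)])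
      else (chunks, line)   -- Python diverges here (fuel exhausted or limit ≤ 0)
    else (chunks, line)

-- body of A's 'for line in lines' loop on state (chunks, cur)
def pvStepA (limit : Int) (st : List (List Char) × List Char) (line : List Char) :
    List (List Char) × List Char :=
  let cand := if st.2.isEmpty then line else st.2 ++ '\n' :: line
  if (cand.length : Int) ≤ limit then (st.1, cand)
  else
    let chunks := if st.2.isEmpty then st.1 else st.1 ++ [st.2]
    pvHardCutA line.length line limit chunks

def split_html_for_telegram (html : String) (limit : Int) : List String :=
  let h := html.toList
  if (h.length : Int) ≤ limit then [html]
  else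
    let lines := PySem.Chars.splitOn h ['\n']
    let s := lines.foldl (pvStepA limit) ([], [])
    let chunks := if s.2.isEmpty then s.1 else s.1 ++ [s.2]
    ((chunks.foldl pvBalStep ([], false)).1).map (fun cs => String.ofList cs)

-- ===== PORT B =====
-- _tokenize's inner while loop; fuel = initial line length (same divergence note as A's)
def pvCutB (fuel : Nat) (line : List Char) (limit : Int) (pieces : List (List Char × Bool)) :
    List (List Char × Bool) × List Char :=
  match fuel with
  | 0 => (pieces, line)
  | fuel + 1 =>
    if (line.length : Int) > limit then
      if 0 < limit then
        pvCutB fuel (PySem.Chars.slice line (some limit) none) limit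
          (pieces ++ [(PySem.Chars.slice line none (some limit), true)])
      else (pieces, line)   -- Python diverges here (fuel exhausted or limit ≤ 0)
    else (pieces, line)

-- body of _tokenize's 'for line in lines' loop
def pvTokStep (limit : Int) (pieces : List (List Char × Bool)) (line : List Char) :
    List (List Char × Bool) :=
  let r := pvCutB line.length line limit pieces
  r.1 ++ [(r.2, false)]

def pvTokenize (lines : List (List Char)) (limit : Int) : List (List Char × Bool) :=
  lines.foldl (pvTokStep limit) []

-- body of _group's loop on state (chunks, parts, n)
def pvGroupStep (limit : Int) (st : List (List Char) × List (List Char) × Int)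
    (p : List Char × Bool) : List (List Char) × List (List Char) × Int :=
  let chunks := st.1; let parts := st.2.1; let n := st.2.2
  if p.2 then
    ((if n ≠ 0 then chunks ++ [PySem.Chars.join ['\n'] parts] else chunks) ++ [p.1], [], 0)
  else if n = 0 then (chunks, [p.1], (p.1.length : Int))
  else if n + 1 + (p.1.length : Int) ≤ limit then (chunks, parts ++ [p.1], n + 1 + (p.1.length : Int))
  else (chunks ++ [PySem.Chars.join ['\n'] parts], [p.1], (p.1.length : Int))

def pvGroup (pieces : List (List Char × Bool)) (limit : Int) : List (List Char) :=
  let s := pieces.foldl (pvGroupStep limit) ([], [], 0)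
  if s.2.2 ≠ 0 then s.1 ++ [PySem.Chars.join ['\n'] s.2.1] else s.1

-- body of _balance's loop on state (out, open_pre)
def pvBalanceStep (st : List (List Char) × Bool) (ch : List Char) : List (List Char) × Bool :=
  let body := if st.2 then "<pre><code>".toList ++ ch else ch
  let op := PySem.Chars.count body "<pre>".toList > PySem.Chars.count body "</pre>".toList
  (st.1 ++ [body ++ (if op then "</code></pre>".toList else [])], op)

def pvBalance (chunks : List (List Char)) : List (List Char) :=
  (chunks.foldl pvBalanceStep ([], false)).1

def split_html_for_telegram_alt (html : String) (limit : Int) : List String :=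
  let h := html.toList
  if (h.length : Int) ≤ limit then [html]
  else
    (pvBalance (pvGroup (pvTokenize (PySem.Chars.splitOn h ['\n']) limit) limit)).map
      (fun cs => String.ofList cs)

-- ===== PRECONDITION & SPEC =====
def Spec_split_html_for_telegram (html : String) (limit : Int) (out : List String) : Prop := out = split_html_for_telegram_alt html limit
instance (html : String) (limit : Int) (out : List String) : Decidable (Spec_split_html_for_telegram html limit out) := by unfold Spec_split_html_for_telegram; infer_instance

-- ===== CLAIM (what is proved, stated in full; the proofs are below) =====
def Claim_equal_split_html_for_telegram : Prop := ∀ (html : String) (limit : Int), Dom_split_html_for_telegram html limit → Spec_split_html_for_telegram html limit (split_html_for_telegram html limit)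

-- ===== LEMMAS AND PROOFS =====

theorem pvBalanceStep_eq (st : List (List Char) × Bool) (ch : List Char) :
    pvBalanceStep st ch = pvBalStep st ch := by
  obtain ⟨acc, fl⟩ := st
  cases fl <;> simp only [pvBalanceStep, pvBalStep, List.nil_append, Bool.false_eq_true,
    if_false, if_true] <;> split_ifs with h <;> simp <;>
    first | exact h | exact Nat.not_lt.mp h

theorem pvHardCutA_acc (limit : Int) (fuel : Nat) :
    ∀ (line : List Char) (chunks : List (List Char)),
    pvHardCutA fuel line limit chunks
      = (chunks ++ (pvHardCutA fuel line limit []).1, (pvHardCutA fuel line limit []).2) := by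
  induction fuel with
  | zero => intro line chunks; simp [pvHardCutA]
  | succ fuel ih =>
    intro line chunks
    simp only [pvHardCutA]
    split
    · split
      · rw [ih _ (chunks ++ _), ih _ ([] ++ _)]; simp
      · simp
    · simp

theorem pvCutB_acc (limit : Int) (fuel : Nat) :
    ∀ (line : List Char) (pieces : List (List Char × Bool)),
    pvCutB fuel line limit pieces
      = (pieces ++ (pvCutB fuel line limit []).1, (pvCutB fuel line limit []).2) := by
  induction fuel with
  | zero => intro line pieces; simp [pvCutB]
  | succ fuel ih =>
    intro line pieces
    simp only [pvCutB]
    split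
    · split
      · rw [ih _ (pieces ++ _), ih _ ([] ++ _)]; simp
      · simp
    · simp

-- B's cut loop produces exactly A's hard slices (tagged) and the same remainder
theorem pvCutB_spec (limit : Int) (fuel : Nat) :
    ∀ (line : List Char),
    pvCutB fuel line limit []
      = ((pvHardCutA fuel line limit []).1.map (fun c => (c, true)),
         (pvHardCutA fuel line limit []).2) := by
  induction fuel with
  | zero => intro line; simp [pvCutB, pvHardCutA]
  | succ fuel ih =>
    intro line
    simp only [pvCutB, pvHardCutA]
    split
    · split
      · rw [pvCutB_acc, pvHardCutA_acc, ih]; simp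
      · simp
    · simp

theorem pvHardCutA_nil_snd (limit : Int) (fuel : Nat) (line : List Char)
    (h : (pvHardCutA fuel line limit []).1 = []) :
    (pvHardCutA fuel line limit []).2 = line := by
  revert h
  cases fuel with
  | zero => simp [pvHardCutA]
  | succ fuel =>
    simp only [pvHardCutA]
    split
    · split
      · rw [pvHardCutA_acc]; simp
      · simp
    · simp

theorem join_snoc (ps : List (List Char)) (l : List Char) (h : ps ≠ []) :
    PySem.Chars.join ['\n'] (ps ++ [l]) = PySem.Chars.join ['\n'] ps ++ '\n' :: l := by
  induction ps with
  | nil => exact absurd rfl h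
  | cons a ps ih =>
    cases ps with
    | nil => simp [PySem.Chars.join_cons_cons, PySem.Chars.join_singleton]
    | cons b ps =>
      have ihh := ih (by simp)
      simp only [List.cons_append] at ihh ⊢
      rw [PySem.Chars.join_cons_cons, PySem.Chars.join_cons_cons, ihh]
      simp

-- grouping a run of hard pieces from a fresh state just appends them
theorem group_hard_fresh (limit : Int) (slices : List (List Char)) :
    ∀ (chunks : List (List Char)),
    List.foldl (pvGroupStep limit) (chunks, [], 0) (slices.map (fun c => (c, true)))
      = (chunks ++ slices, [], 0) := by
  induction slices with
  | nil => intro chunks; simp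
  | cons s rest ih =>
    intro chunks
    simp only [List.map_cons, List.foldl_cons]
    rw [show pvGroupStep limit (chunks, [], 0) (s, true) = (chunks ++ [s], [], 0) by
      simp [pvGroupStep]]
    rw [ih]; simp

-- one line of A's loop vs B's pieces of that line fed through the group step
theorem cutA_le (limit : Int) (fuel : Nat) (line : List Char)
    (h : (line.length : Int) ≤ limit) : pvHardCutA fuel line limit [] = ([], line) := by
  cases fuel
  · simp [pvHardCutA]
  · simp [pvHardCutA]; omega

theorem pvTokStep_acc (limit : Int) (pieces : List (List Char × Bool)) (line : List Char) :
    pvTokStep limit pieces line = pieces ++ pvTokStep limit [] line := by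
  simp only [pvTokStep]
  rw [pvCutB_acc]
  simp

theorem pvTok_acc (limit : Int) (lines : List (List Char)) :
    ∀ (acc : List (List Char × Bool)),
    lines.foldl (pvTokStep limit) acc = acc ++ lines.foldl (pvTokStep limit) [] := by
  induction lines with
  | nil => intro acc; simp
  | cons l ls ih =>
    intro acc
    simp only [List.foldl_cons]
    rw [ih (pvTokStep limit acc l), ih (pvTokStep limit [] l), pvTokStep_acc]
    simp

theorem step_fuse (limit : Int) (line : List Char) (chunks : List (List Char))
    (cur : List Char) (parts : List (List Char)) (n : Int)
    (hj : PySem.Chars.join ['\n'] parts = cur) (hn : n = (cur.length : Int)) :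
    ∃ parts',
      List.foldl (pvGroupStep limit) (chunks, parts, n) (pvTokStep limit [] line)
        = ((pvStepA limit (chunks, cur) line).1, parts',
           ((pvStepA limit (chunks, cur) line).2.length : Int))
      ∧ PySem.Chars.join ['\n'] parts' = (pvStepA limit (chunks, cur) line).2 := by
  have hcur0 : (cur.isEmpty = true) ↔ n = 0 := by subst hn; simp [List.isEmpty_iff]
  have hTok : pvTokStep limit [] line
      = (pvHardCutA line.length line limit []).1.map (fun c => (c, true))
        ++ [((pvHardCutA line.length line limit []).2, false)] := by
    simp only [pvTokStep, pvCutB_spec]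
  rw [hTok]
  simp only [pvStepA]
  by_cases hle : (((if cur.isEmpty then line else cur ++ '\n' :: line) : List Char).length : Int) ≤ limit
  · -- the line merges into the current chunk (or starts it)
    have hl : (line.length : Int) ≤ limit := by
      cases hE : cur.isEmpty
      · rw [if_neg (by simp [hE])] at hle
        simp only [List.length_append, List.length_cons] at hle
        push_cast at hle ⊢; omega
      · rwa [if_pos (by simp [hE])] at hle
    rw [cutA_le limit line.length line hl, if_pos hle]
    simp only [List.map_nil, List.nil_append, List.foldl_cons, List.foldl_nil]
    by_cases hn0 : n = 0
    · have hE : cur.isEmpty = true := hcur0.mpr hn0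
      have hceq : cur = [] := List.isEmpty_iff.mp hE
      refine ⟨[line], ?_, by simp [PySem.Chars.join_singleton, hceq]⟩
      simp [pvGroupStep, hn0, hceq]
    · have hE : cur.isEmpty = false := by
        cases hE : cur.isEmpty
        · rfl
        · exact absurd (hcur0.mp hE) hn0
      have hcand : ((cur ++ '\n' :: line).length : Int) = n + 1 + (line.length : Int) := by
        simp only [List.length_append, List.length_cons]; push_cast; omega
      rw [if_neg (by simp [hE])] at hle ⊢
      have hfit : n + 1 + (line.length : Int) ≤ limit := by omega
      refine ⟨parts ++ [line], ?_, ?_⟩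
      · have hpne : parts ≠ [] := by
          intro h; subst h
          simp [PySem.Chars.join_nil] at hj
          exact hn0 (by simp [hn, ← hj])
        simp [pvGroupStep, hn0, hfit]
        omega
      · have hpne : parts ≠ [] := by
          intro h; subst h
          simp [PySem.Chars.join_nil] at hj
          exact hn0 (by simp [hn, ← hj])
        rw [join_snoc parts line hpne, hj]
  · -- flush, then hard-cut the line
    rw [if_neg hle]
    have hch : (if cur.isEmpty then chunks else chunks ++ [cur])
        = (if n ≠ 0 then chunks ++ [PySem.Chars.join ['\n'] parts] else chunks) := by
      by_cases hn0 : n = 0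
      · rw [if_pos (by simp [hcur0.mpr hn0]), if_neg (by simp [hn0])]
      · have hE : cur.isEmpty = false := by
          cases hE : cur.isEmpty
          · rfl
          · exact absurd (hcur0.mp hE) hn0
        rw [if_neg (by simp [hE]), if_pos hn0, hj]
    rw [pvHardCutA_acc limit line.length line (if cur.isEmpty = true then chunks else chunks ++ [cur])]
    cases h1 : (pvHardCutA line.length line limit []).1 with
    | nil =>
      have h2 : (pvHardCutA line.length line limit []).2 = line := pvHardCutA_nil_snd limit _ line h1
      rw [h2]
      simp only [List.map_nil, List.nil_append, List.foldl_cons, List.foldl_nil, List.append_nil]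
      by_cases hn0 : n = 0
      · have hE : cur.isEmpty = true := hcur0.mpr hn0
        have hceq : cur = [] := List.isEmpty_iff.mp hE
        refine ⟨[line], ?_, by simp [PySem.Chars.join_singleton]⟩
        simp [pvGroupStep, hn0, hceq]
      · have hE : cur.isEmpty = false := by
          cases hE : cur.isEmpty
          · rfl
          · exact absurd (hcur0.mp hE) hn0
        have hnofit : ¬ (n + 1 + (line.length : Int) ≤ limit) := by
          rw [if_neg (by simp [hE])] at hle
          simp only [List.length_append, List.length_cons] at hle
          push_cast at hle; omega
        refine ⟨[line], ?_, by simp [PySem.Chars.join_singleton]⟩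
        have hcne : cur ≠ [] := fun hh => hn0 (hcur0.mp (by simp [hh]))
        simp [pvGroupStep, hn0, hnofit, hj, hcne]
    | cons sl rest =>
      simp only [List.map_cons, List.cons_append, List.foldl_cons]
      have hfirst : pvGroupStep limit (chunks, parts, n) (sl, true)
          = ((if cur.isEmpty then chunks else chunks ++ [cur]) ++ [sl], [], 0) := by
        simp only [pvGroupStep, hch]
        by_cases hn0 : n = 0
        · simp
        · simp [hn0]
      rw [hfirst, List.foldl_append, group_hard_fresh]
      refine ⟨[(pvHardCutA line.length line limit []).2], ?_,
        by simp [PySem.Chars.join_singleton]⟩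
      simp [pvGroupStep]

theorem main_fuse (limit : Int) (lines : List (List Char)) :
    ∀ (chunks : List (List Char)) (cur : List Char) (parts : List (List Char)) (n : Int),
    PySem.Chars.join ['\n'] parts = cur → n = (cur.length : Int) →
    ∃ parts',
      List.foldl (pvGroupStep limit) (chunks, parts, n) (lines.foldl (pvTokStep limit) [])
        = ((lines.foldl (pvStepA limit) (chunks, cur)).1, parts',
           ((lines.foldl (pvStepA limit) (chunks, cur)).2.length : Int))
      ∧ PySem.Chars.join ['\n'] parts' = (lines.foldl (pvStepA limit) (chunks, cur)).2 := by
  induction lines with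
  | nil => intro chunks cur parts n hj hn; exact ⟨parts, by simp [hn], hj⟩
  | cons l ls ih =>
    intro chunks cur parts n hj hn
    simp only [List.foldl_cons]
    rw [pvTok_acc limit ls (pvTokStep limit [] l), List.foldl_append]
    obtain ⟨p1, he, hje⟩ := step_fuse limit l chunks cur parts n hj hn
    obtain ⟨p2, he2, hj2⟩ := ih (pvStepA limit (chunks, cur) l).1 (pvStepA limit (chunks, cur) l).2
      p1 ((pvStepA limit (chunks, cur) l).2.length : Int) hje rfl
    refine ⟨p2, ?_, by simpa using hj2⟩
    rw [he, he2]

-- ===== VERDICT (by name: the statement is the Claim_ definition above) =====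
theorem split_html_for_telegram_spec : Claim_equal_split_html_for_telegram := by
  intro html limit _
  unfold Spec_split_html_for_telegram split_html_for_telegram split_html_for_telegram_alt
  dsimp only
  by_cases h : ((html.toList.length : Int) ≤ limit)
  · rw [if_pos h, if_pos h]
  · rw [if_neg h, if_neg h]
    have hbal : pvBalanceStep = pvBalStep := funext fun st => funext fun ch => pvBalanceStep_eq st ch
    obtain ⟨p', he, hjp⟩ := main_fuse limit (PySem.Chars.splitOn html.toList ['\n']) [] [] [] 0
      (by simp [PySem.Chars.join_nil]) (by simp)
    have hchunks : pvGroup (pvTokenize (PySem.Chars.splitOn html.toList ['\n']) limit) limit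
        = (if ((PySem.Chars.splitOn html.toList ['\n']).foldl (pvStepA limit) ([], [])).2.isEmpty
           then ((PySem.Chars.splitOn html.toList ['\n']).foldl (pvStepA limit) ([], [])).1
           else ((PySem.Chars.splitOn html.toList ['\n']).foldl (pvStepA limit) ([], [])).1
                ++ [((PySem.Chars.splitOn html.toList ['\n']).foldl (pvStepA limit) ([], [])).2]) := by
      simp only [pvGroup, pvTokenize]
      rw [he]
      by_cases hsE : ((PySem.Chars.splitOn html.toList ['\n']).foldl (pvStepA limit) ([], [])).2.isEmpty
      · have h0 : ((PySem.Chars.splitOn html.toList ['\n']).foldl (pvStepA limit) ([], [])).2 = [] :=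
          List.isEmpty_iff.mp hsE
        simp [h0]
      · have h0 : ((PySem.Chars.splitOn html.toList ['\n']).foldl (pvStepA limit) ([], [])).2 ≠ [] := by
          simpa [List.isEmpty_iff] using hsE
        have hlen : (((PySem.Chars.splitOn html.toList ['\n']).foldl (pvStepA limit) ([], [])).2.length : Int) ≠ 0 := by
          intro hh
          exact h0 (List.length_eq_zero_iff.mp (by exact_mod_cast hh))
        simp [hjp, h0]
    rw [hchunks]
    simp only [pvBalance, hbal]
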